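-- pv_equiv track=rewrite | github.com/xianNeuro/helper_functions | xianfunc.py | get_indices2
-- ===== SOURCE A (Python) =====
-- def get_indices2(search_list,searched_item):
--     #if search_list = [1,2,3,5,1,81] and searcher_item = [1,81], this returns ind_list =[0,4,5]
--     ind_list=[]
--     dt = type(searched_item)
--     if dt==str or dt==int or dt==float:
--         item = searched_item
--         for i in range(len(search_list)):
--             if search_list[i]==item:
--                 if i not in ind_list:
--                     ind_list.append(i)
--     else:
--         for item in searched_item:
--             for i in range(len(search_list)):
--                 if search_list[i]==item:
--                     if i not in ind_list:
--                         ind_list.append(i)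
--     return sorted(ind_list)
-- ===== SOURCE B (Python) =====
-- def get_indices2(search_list, searched_item):
--     # Single increasing pass over search_list: indices come out sorted and
--     # duplicate-free by construction, so no dedup guard and no final sorted().
--     dt = type(searched_item)
--     if dt == str or dt == int or dt == float:
--         return [i for i, x in enumerate(search_list) if x == searched_item]
--     return [i for i, x in enumerate(search_list)
--             if any(x == item for item in searched_item)]
-- ===== Notes on version B (the rewrite author's own statement) =====
-- stated objective: faster
-- what changed: Swapped the loop nesting to one increasing pass over search_list with an inner any() over the items, so the result is sorted and duplicate-free by construction and A's quadratic 'i not in ind_list' membership scan and final sorted() disappear.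
import Mathlib
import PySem

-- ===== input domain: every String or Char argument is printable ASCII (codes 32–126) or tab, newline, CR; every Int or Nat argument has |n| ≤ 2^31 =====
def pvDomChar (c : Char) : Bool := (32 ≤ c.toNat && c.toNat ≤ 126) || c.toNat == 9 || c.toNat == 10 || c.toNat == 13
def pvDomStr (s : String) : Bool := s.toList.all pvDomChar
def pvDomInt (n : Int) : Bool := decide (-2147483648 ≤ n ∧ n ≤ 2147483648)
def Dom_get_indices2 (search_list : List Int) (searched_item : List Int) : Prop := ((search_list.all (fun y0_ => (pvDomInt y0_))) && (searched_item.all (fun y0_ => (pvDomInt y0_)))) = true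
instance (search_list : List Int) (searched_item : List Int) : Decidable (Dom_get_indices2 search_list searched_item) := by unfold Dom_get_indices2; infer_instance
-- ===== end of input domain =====

-- B changes the loop nesting (one increasing pass over search_list, inner any() over items),
-- so the dedup guard and the final sorted() disappear; same return value.

-- ===== PORT A =====
-- searched_item : List Int, so the type(searched_item) dispatch always takes the else branch.
def get_indices2 (search_list : List Int) (searched_item : List Int) : List Int :=
  let ind_list :=
    searched_item.foldl (fun acc item =>
      (PySem.List.pyRange 0 search_list.length 1).foldl (fun acc2 i =>
        if PySem.List.pyGetD search_list i 0 == item then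
          (if acc2.contains i then acc2 else acc2 ++ [i])
        else acc2) acc) []
  PySem.List.sorted ind_list (fun x => x) false

-- ===== PORT B =====
def get_indices2_alt (search_list : List Int) (searched_item : List Int) : List Int :=
  (PySem.List.enumerate search_list 0).filterMap (fun p =>
    if searched_item.any (fun item => p.2 == item) then some p.1 else none)

-- ===== PRECONDITION & SPEC =====
def Spec_get_indices2 (search_list : List Int) (searched_item : List Int) (out : List Int) : Prop := out = get_indices2_alt search_list searched_item
instance (search_list : List Int) (searched_item : List Int) (out : List Int) : Decidable (Spec_get_indices2 search_list searched_item out) := by unfold Spec_get_indices2; infer_instance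

-- ===== CLAIM (what is proved, stated in full; the proofs are below) =====
def Claim_equal_get_indices2 : Prop := ∀ (search_list : List Int) (searched_item : List Int), Dom_get_indices2 search_list searched_item → Spec_get_indices2 search_list searched_item (get_indices2 search_list searched_item)

-- ===== LEMMAS AND PROOFS =====

-- the inner dedup-append loop: membership invariant, over an arbitrary index list
theorem dedupAppend_mem (cond : Int → Bool) (idxs : List Int) (acc : List Int) (x : Int) :
    x ∈ idxs.foldl (fun acc2 i => if cond i then (if acc2.contains i then acc2 else acc2 ++ [i]) else acc2) acc ↔
      x ∈ acc ∨ (x ∈ idxs ∧ cond x) := by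
  induction idxs generalizing acc with
  | nil => simp
  | cons i t ih =>
    simp only [List.foldl_cons]
    by_cases hc : cond i
    · by_cases hm : acc.contains i = true
      · rw [if_pos hc, if_pos hm, ih]
        have hm' : i ∈ acc := by simpa using hm
        constructor
        · rintro (h | ⟨h1, h2⟩)
          · exact Or.inl h
          · exact Or.inr ⟨List.mem_cons_of_mem _ h1, h2⟩
        · rintro (h | ⟨h1, h2⟩)
          · exact Or.inl h
          · rcases List.mem_cons.mp h1 with rfl | h1
            · exact Or.inl hm'
            · exact Or.inr ⟨h1, h2⟩
      · rw [if_pos hc, if_neg hm, ih]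
        constructor
        · rintro (h | ⟨h1, h2⟩)
          · rcases List.mem_append.mp h with h | h
            · exact Or.inl h
            · rcases List.mem_singleton.mp h with rfl
              exact Or.inr ⟨List.mem_cons_self, hc⟩
          · exact Or.inr ⟨List.mem_cons_of_mem _ h1, h2⟩
        · rintro (h | ⟨h1, h2⟩)
          · exact Or.inl (List.mem_append.mpr (Or.inl h))
          · rcases List.mem_cons.mp h1 with rfl | h1
            · exact Or.inl (List.mem_append.mpr (Or.inr (List.mem_singleton.mpr rfl)))
            · exact Or.inr ⟨h1, h2⟩
    · rw [if_neg hc, ih]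
      constructor
      · rintro (h | ⟨h1, h2⟩)
        · exact Or.inl h
        · exact Or.inr ⟨List.mem_cons_of_mem _ h1, h2⟩
      · rintro (h | ⟨h1, h2⟩)
        · exact Or.inl h
        · rcases List.mem_cons.mp h1 with rfl | h1
          · exact absurd h2 (by simpa using hc)
          · exact Or.inr ⟨h1, h2⟩

-- the inner dedup-append loop preserves Nodup
theorem dedupAppend_nodup (cond : Int → Bool) (idxs : List Int) (acc : List Int) (h : acc.Nodup) :
    (idxs.foldl (fun acc2 i => if cond i then (if acc2.contains i then acc2 else acc2 ++ [i]) else acc2) acc).Nodup := by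
  induction idxs generalizing acc with
  | nil => simpa
  | cons i t ih =>
    simp only [List.foldl_cons]
    by_cases hc : cond i
    · by_cases hm : acc.contains i = true
      · rw [if_pos hc, if_pos hm]; exact ih _ h
      · rw [if_pos hc, if_neg hm]
        have hm' : i ∉ acc := by simpa using hm
        exact ih _ (by
          simp [List.nodup_append, h]
          intro a ha hai
          exact hm' (hai ▸ ha))
    · rw [if_neg hc]; exact ih _ h

-- A's accumulated list: membership
theorem indList_mem (sl si : List Int) (acc : List Int) (x : Int) :
    x ∈ si.foldl (fun acc item =>
        (PySem.List.pyRange 0 sl.length 1).foldl (fun acc2 i =>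
          if PySem.List.pyGetD sl i 0 == item then (if acc2.contains i then acc2 else acc2 ++ [i]) else acc2) acc) acc ↔
      x ∈ acc ∨ (∃ item ∈ si, x ∈ PySem.List.pyRange 0 sl.length 1 ∧ PySem.List.pyGetD sl x 0 = item) := by
  induction si generalizing acc with
  | nil => simp
  | cons it t ih =>
    simp only [List.foldl_cons, ih, dedupAppend_mem]
    constructor
    · rintro (⟨h | ⟨h1, h2⟩⟩ | ⟨item, hm, h1, h2⟩)
      · exact Or.inl h
      · exact Or.inr ⟨it, by simp, h1, by simpa using h2⟩
      · exact Or.inr ⟨item, by simp [hm], h1, h2⟩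
    · rintro (h | ⟨item, hm, h1, h2⟩)
      · exact Or.inl (Or.inl h)
      · rcases List.mem_cons.mp hm with rfl | hm
        · exact Or.inl (Or.inr ⟨h1, by simpa using h2⟩)
        · exact Or.inr ⟨item, hm, h1, h2⟩

-- A's accumulated list: Nodup
theorem indList_nodup (sl si : List Int) (acc : List Int) (h : acc.Nodup) :
    (si.foldl (fun acc item =>
        (PySem.List.pyRange 0 sl.length 1).foldl (fun acc2 i =>
          if PySem.List.pyGetD sl i 0 == item then (if acc2.contains i then acc2 else acc2 ++ [i]) else acc2) acc) acc).Nodup := by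
  induction si generalizing acc with
  | nil => simpa
  | cons it t ih => exact ih _ (dedupAppend_nodup _ _ _ h)

-- a conditional filterMap is a filter-then-map
theorem filterMap_if_eq_map_filter {α β : Type} (c : α → Bool) (f : α → β) (xs : List α) :
    xs.filterMap (fun p => if c p then some (f p) else none) = (xs.filter c).map f := by
  induction xs with
  | nil => rfl
  | cons x t ih => by_cases h : c x <;> simp [h, ih]

-- B's result is strictly increasing
theorem alt_pairwise (sl si : List Int) :
    (get_indices2_alt sl si).Pairwise (· < ·) := by
  unfold get_indices2_alt
  rw [filterMap_if_eq_map_filter]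
  have h1 : ((PySem.List.enumerate sl 0).filter (fun p => si.any (fun item => p.2 == item))).Pairwise
      (fun p q => p.1 < q.1) :=
    List.Pairwise.filter _ (PySem.List.pairwise_lt_enumerate sl 0)
  exact List.pairwise_map.mpr h1

-- B's membership
theorem alt_mem (sl si : List Int) (x : Int) :
    x ∈ get_indices2_alt sl si ↔
      ∃ (k : Nat), ∃ (h : k < sl.length), x = (k : Int) ∧ si.any (fun item => sl[k] == item) := by
  unfold get_indices2_alt
  rw [filterMap_if_eq_map_filter]
  simp only [List.mem_map, List.mem_filter, PySem.List.mem_enumerate_iff]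
  constructor
  · rintro ⟨p, ⟨⟨k, hk, rfl⟩, hc⟩, rfl⟩
    exact ⟨k, hk, by simp, by simpa using hc⟩
  · rintro ⟨k, hk, rfl, hc⟩
    exact ⟨((k : Int), sl[k]), ⟨⟨k, hk, by simp⟩, by simpa using hc⟩, rfl⟩

-- membership equivalence between A's collected indices and B's
theorem mem_equiv (sl si : List Int) (x : Int) :
    ((∃ item ∈ si, x ∈ PySem.List.pyRange 0 sl.length 1 ∧ PySem.List.pyGetD sl x 0 = item) ↔
      ∃ (k : Nat), ∃ (h : k < sl.length), x = (k : Int) ∧ si.any (fun item => sl[k] == item)) := by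
  constructor
  · rintro ⟨item, hm, hr, hv⟩
    rw [PySem.List.mem_pyRange_one] at hr
    obtain ⟨hr0, hr1⟩ := hr
    refine ⟨x.toNat, by omega, by omega, ?_⟩
    rw [List.any_eq_true]
    refine ⟨item, hm, ?_⟩
    have hg : PySem.List.pyGetD sl x 0 = sl[x.toNat] :=
      PySem.List.pyGetD_eq_getElem sl 0 hr0 (by omega)
    simp [← hg, hv]
  · rintro ⟨k, hk, rfl, hc⟩
    rw [List.any_eq_true] at hc
    obtain ⟨item, hm, hv⟩ := hc
    refine ⟨item, hm, ?_, ?_⟩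
    · rw [PySem.List.mem_pyRange_one]; omega
    · have hg : PySem.List.pyGetD sl ((k : Nat) : Int) 0 = sl[k] :=
        PySem.List.pyGetD_eq_getElem sl 0 (by omega) (by simpa using hk)
      simpa [hg] using hv

-- ===== VERDICT (by name: the statement is the Claim_ definition above) =====
theorem get_indices2_spec : Claim_equal_get_indices2 := by
  intro sl si _
  unfold Spec_get_indices2 get_indices2
  have hnodupL := indList_nodup sl si [] (by simp)
  have hnodupM : (get_indices2_alt sl si).Nodup := (alt_pairwise sl si).imp (fun h => ne_of_lt h)
  have hperm : (get_indices2_alt sl si).Perm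
      (si.foldl (fun acc item =>
        (PySem.List.pyRange 0 sl.length 1).foldl (fun acc2 i =>
          if PySem.List.pyGetD sl i 0 == item then (if acc2.contains i then acc2 else acc2 ++ [i]) else acc2) acc) []) := by
    rw [List.perm_ext_iff_of_nodup hnodupM hnodupL]
    intro x
    rw [alt_mem, indList_mem]
    simp only [List.not_mem_nil, false_or]
    exact (mem_equiv sl si x).symm
  exact PySem.List.sorted_eq_of_perm_of_pairwise_lt _ _ _ hperm (alt_pairwise sl si)
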